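-- pv_equiv track=rewrite | github.com/DanielTorres98/Lie_Symmetry_Analysis_Agorithm | Notebooks/utils/latex.py | latex_derivative
-- ===== SOURCE A (Python) =====
-- def latex_derivative(list_devs, var, var_list):
--     """Given a list of derivatives executes all the
--        derivatives on the variable.
--
--     Parameters
--     ----------
--     list_devs : [list]
--         list of ints containing the
--         order of the derivative
--         with respect to the variable
--         var_lists.
--     var : [str]
--         variable to be differentiate
--     var_list : [list]
--         list of independant and dependant
--                           variables.
--
--     Returns
--     -------
--     [str]
--         latex code for the derivative.
--     """
--     D_v = zip(list_devs, var_list)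
--     var_str = '\\' + var
--     for D, v in D_v:
--         for _ in range(D):
--             if len(v)>1:
--                 if '_' in var_str:
--                     var_str = var_str + "\\" +  v
--                 else:
--                     var_str = var_str + '_' + '{' + "\\" + v
--             else:
--                 if '_' in var_str:
--                     var_str = var_str + v
--                 else:
--                     var_str = var_str + '_' + '{' + v
--     var = var_str + '}'
--     return var
-- ===== SOURCE B (Python) =====
-- def latex_derivative(list_devs, var, var_list):
--     """Same result as A: decide the single '_{'-opening once, up front,
--     then build all derivative pieces in one pass and join them."""
--     has_underscore = '_' in var
--     pieces = []
--     for D, v in zip(list_devs, var_list):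
--         pieces.extend(['\\' + v if len(v) > 1 else v] * D)
--     body = ''.join(pieces)
--     if pieces and not has_underscore:
--         body = '_' + '{' + body
--     return '\\' + var + body + '}'
-- ===== Notes on version B (the rewrite author's own statement) =====
-- stated objective: simpler
-- what changed: Instead of growing the string and re-scanning it for '_' on every inner iteration, B decides the one-time '_{' opening once up front, builds the list of per-derivative pieces in a single pass (extend with [piece]*D), and joins them.
import Mathlib
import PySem

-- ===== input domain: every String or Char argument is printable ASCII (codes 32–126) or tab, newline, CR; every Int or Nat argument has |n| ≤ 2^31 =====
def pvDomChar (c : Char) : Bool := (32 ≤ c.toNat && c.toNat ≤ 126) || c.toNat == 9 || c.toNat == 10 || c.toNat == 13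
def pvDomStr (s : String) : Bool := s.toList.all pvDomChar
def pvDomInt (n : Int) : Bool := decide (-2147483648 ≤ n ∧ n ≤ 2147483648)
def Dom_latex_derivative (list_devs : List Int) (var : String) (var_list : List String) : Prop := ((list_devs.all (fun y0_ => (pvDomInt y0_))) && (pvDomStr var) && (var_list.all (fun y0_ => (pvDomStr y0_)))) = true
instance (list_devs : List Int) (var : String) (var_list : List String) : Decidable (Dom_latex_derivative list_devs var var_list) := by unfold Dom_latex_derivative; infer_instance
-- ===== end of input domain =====

-- B hoists the one-time '_{'-opening decision out of the loop and builds the body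
-- as a joined list of per-derivative pieces (objective: simpler decomposition).

-- ===== PORT A =====
-- A's loop body works on the growing string var_str (here: List Char, via .toList)
def latex_derivative (list_devs : List Int) (var : String) (var_list : List String) : String :=
  let D_v := List.zip list_devs var_list
  let var_str : List Char := '\\' :: var.toList
  let var_str := D_v.foldl (fun var_str Dv =>
    (PySem.List.pyRange 0 Dv.1 1).foldl (fun var_str _ =>
      if PySem.Str.len Dv.2 > 1 then
        if PySem.Chars.isIn ['_'] var_str then var_str ++ '\\' :: Dv.2.toList
        else var_str ++ '_' :: '{' :: '\\' :: Dv.2.toList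
      else
        if PySem.Chars.isIn ['_'] var_str then var_str ++ Dv.2.toList
        else var_str ++ '_' :: '{' :: Dv.2.toList) var_str) var_str
  String.ofList (var_str ++ ['}'])

-- ===== PORT B =====
def latex_derivative_alt (list_devs : List Int) (var : String) (var_list : List String) : String :=
  let has_underscore := PySem.Chars.isIn ['_'] var.toList
  let pieces : List (List Char) := (List.zip list_devs var_list).foldl (fun acc Dv =>
    acc ++ PySem.List.pyRepeat
      [if PySem.Str.len Dv.2 > 1 then '\\' :: Dv.2.toList else Dv.2.toList] Dv.1) []
  let body := pieces.flatten   -- ''.join(pieces)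
  let body := if ¬ pieces.isEmpty ∧ ¬ has_underscore then '_' :: '{' :: body else body
  String.ofList ('\\' :: var.toList ++ body ++ ['}'])

-- ===== PRECONDITION & SPEC =====
def Spec_latex_derivative (list_devs : List Int) (var : String) (var_list : List String) (out : String) : Prop := out = latex_derivative_alt list_devs var var_list
instance (list_devs : List Int) (var : String) (var_list : List String) (out : String) : Decidable (Spec_latex_derivative list_devs var var_list out) := by unfold Spec_latex_derivative; infer_instance

-- ===== CLAIM (what is proved, stated in full; the proofs are below) =====
def Claim_equal_latex_derivative : Prop := ∀ (list_devs : List Int) (var : String) (var_list : List String), Dom_latex_derivative list_devs var var_list → Spec_latex_derivative list_devs var var_list (latex_derivative list_devs var var_list)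

-- ===== LEMMAS AND PROOFS =====

-- the per-piece string appended for variable v
def pvPiece (v : String) : List Char :=
  if PySem.Str.len v > 1 then '\\' :: v.toList else v.toList

-- one step of A's inner loop, expressed on the appended piece
def pvStep (s q : List Char) : List Char :=
  if PySem.Chars.isIn ['_'] s then s ++ q else s ++ '_' :: '{' :: q

lemma pvIsIn_underscore (s : List Char) :
    PySem.Chars.isIn ['_'] s = true ↔ '_' ∈ s := by
  rw [PySem.Chars.isIn_iff_infix]; exact List.singleton_infix_iff _ _

-- A's inner branch quadruple is pvStep on the piece
lemma pvInner_eq_step (v : String) (s : List Char) :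
    (if PySem.Str.len v > 1 then
        if PySem.Chars.isIn ['_'] s then s ++ '\\' :: v.toList
        else s ++ '_' :: '{' :: '\\' :: v.toList
      else
        if PySem.Chars.isIn ['_'] s then s ++ v.toList
        else s ++ '_' :: '{' :: v.toList) = pvStep s (pvPiece v) := by
  simp only [pvStep, pvPiece]
  split_ifs <;> rfl

lemma pvIsIn_underscore_false (s : List Char) (h : '_' ∉ s) :
    PySem.Chars.isIn ['_'] s = false := by
  cases ht : PySem.Chars.isIn ['_'] s
  · rfl
  · exact absurd ((pvIsIn_underscore s).mp ht) h

-- folding pvStep over a list of pieces, starting from a state whose '_'-membership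
-- is known, appends all pieces with '_{' opened once iff needed
lemma pvFold_step (qs : List (List Char)) (s : List Char) :
    qs.foldl pvStep s =
      if qs.isEmpty then s
      else if '_' ∈ s then s ++ qs.flatten
      else s ++ '_' :: '{' :: qs.flatten := by
  induction qs generalizing s with
  | nil => simp
  | cons q t ih =>
    have hmem : ∀ r : List Char, '_' ∈ pvStep s r := by
      intro r
      by_cases h : '_' ∈ s
      · simp [pvStep, (pvIsIn_underscore s).mpr h, h]
      · simp [pvStep, pvIsIn_underscore_false s h]
    have hL : (q :: t).foldl pvStep s = pvStep s q ++ t.flatten := by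
      rw [List.foldl_cons, ih (pvStep s q)]
      by_cases ht : t.isEmpty
      · simp [List.isEmpty_iff.mp ht]
      · simp [ht, hmem q]
    rw [hL]
    by_cases h : '_' ∈ s
    · simp [pvStep, (pvIsIn_underscore s).mpr h, h]
    · simp [pvStep, pvIsIn_underscore_false s h, h]

-- a fold ignoring its elements equals the fold over the same-length replicate
lemma pvFoldl_const {α β γ : Type} (f : β → γ → β) (l : List α) (q : γ) (init : β) :
    l.foldl (fun s _ => f s q) init = (List.replicate l.length q).foldl f init := by
  induction l generalizing init with
  | nil => rfl
  | cons x t ih => simp [List.replicate_succ, ih]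

lemma pvLen_pyRange (D : Int) : (PySem.List.pyRange 0 D 1).length = D.toNat := by
  simp [PySem.List.pyRange]; omega

theorem latex_derivative_spec : Claim_equal_latex_derivative := by
  intro list_devs var var_list _
  unfold Spec_latex_derivative latex_derivative latex_derivative_alt
  simp only []
  -- rewrite A's double fold into a single fold of pvStep over the expanded pieces
  have hA : ∀ (ps : List (Int × String)) (s : List Char),
      ps.foldl (fun var_str Dv =>
        (PySem.List.pyRange 0 Dv.1 1).foldl (fun var_str _ =>
          if PySem.Str.len Dv.2 > 1 then
            if PySem.Chars.isIn ['_'] var_str then var_str ++ '\\' :: Dv.2.toList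
            else var_str ++ '_' :: '{' :: '\\' :: Dv.2.toList
          else
            if PySem.Chars.isIn ['_'] var_str then var_str ++ Dv.2.toList
            else var_str ++ '_' :: '{' :: Dv.2.toList) var_str) s
      = (ps.flatMap (fun Dv => List.replicate Dv.1.toNat (pvPiece Dv.2))).foldl pvStep s := by
    intro ps
    induction ps with
    | nil => intro s; rfl
    | cons p t ih =>
      intro s
      simp only [List.foldl_cons, List.flatMap_cons, List.foldl_append, ih]
      congr 1
      have hfun : (fun (var_str : List Char) (_ : Int) =>
          if PySem.Str.len p.2 > 1 then
            if PySem.Chars.isIn ['_'] var_str then var_str ++ '\\' :: p.2.toList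
            else var_str ++ '_' :: '{' :: '\\' :: p.2.toList
          else
            if PySem.Chars.isIn ['_'] var_str then var_str ++ p.2.toList
            else var_str ++ '_' :: '{' :: p.2.toList)
          = fun s (_ : Int) => pvStep s (pvPiece p.2) := by
        funext s' _; exact pvInner_eq_step p.2 s'
      rw [hfun, pvFoldl_const (f := pvStep) (q := pvPiece p.2), pvLen_pyRange p.1]
  rw [hA]
  -- B's pieces fold is the same flatMap
  have hB : (List.zip list_devs var_list).foldl (fun acc Dv =>
      acc ++ PySem.List.pyRepeat
        [if PySem.Str.len Dv.2 > 1 then '\\' :: Dv.2.toList else Dv.2.toList] Dv.1) []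
      = (List.zip list_devs var_list).flatMap (fun Dv => List.replicate Dv.1.toNat (pvPiece Dv.2)) := by
    rw [PySem.List.foldl_append_eq_flatMap]
    simp only [List.nil_append]
    exact List.flatMap_congr (fun Dv _ => by rw [PySem.List.pyRepeat_singleton]; rfl)
  rw [hB]
  set qs := (List.zip list_devs var_list).flatMap (fun Dv => List.replicate Dv.1.toNat (pvPiece Dv.2)) with hqs
  rw [pvFold_step]
  have hmemvar : ('_' ∈ '\\' :: var.toList) ↔ '_' ∈ var.toList := by simp
  by_cases hq : qs.isEmpty
  · simp [List.isEmpty_iff.mp hq]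
  · by_cases hu : '_' ∈ var.toList
    · simp [hq, hmemvar.mpr hu, (pvIsIn_underscore var.toList).mpr hu]
    · simp [hq, pvIsIn_underscore_false var.toList hu, hu]
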